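-- pv_equiv track=rewrite | github.com/AndreiSuciu4/AI | The method of least square/main.py | verifyData
-- ===== SOURCE A (Python) =====
-- def verifyData(inputs, outputs):
--     matrix = []
--     output = []
--     copy = [x for x in inputs]
--     inputs.sort(key=lambda row: row[0:])
--     ln = len(inputs)
--     if inputs[0] != inputs[1]:
--         matrix.append(inputs[0])
--         output.append(outputs[copy.index(inputs[0])])
--     for i in range(1, ln - 1):
--         if inputs[i - 1] != inputs[i] and inputs[i] != inputs[i + 1]:
--            matrix.append(inputs[i])
--            output.append(outputs[copy.index(inputs[i])])
--     if inputs[ln - 2] != inputs[ln - 1]: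
--         matrix.append(inputs[ln - 1])
--         output.append(outputs[copy.index(inputs[ln - 1])])
--
--     return matrix, output
-- ===== SOURCE B (Python) =====
-- def verifyData(inputs, outputs):
--     # Same in-place sort as the original; rows kept are those occurring exactly once.
--     copy = [x for x in inputs]
--     inputs.sort(key=lambda row: row[0:])
--     counts = {}
--     for r in copy:
--         t = tuple(r)
--         counts[t] = counts.get(t, 0) + 1
--     first = {}
--     for i, r in enumerate(copy):
--         t = tuple(r)
--         if t not in first:
--             first[t] = i
--     matrix = []
--     output = []
--     for row in inputs:
--         t = tuple(row)
--         if counts[t] == 1: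
--             matrix.append(row)
--             output.append(outputs[first[t]])
--     return matrix, output
-- ===== Notes on version B (the rewrite author's own statement) =====
-- stated objective: alternative
-- what changed: Replaces A's three-way neighbour tests plus a repeated copy.index scan per kept row with one-pass count and first-occurrence-index dictionaries and a single filter over the sorted list.
import Mathlib
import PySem

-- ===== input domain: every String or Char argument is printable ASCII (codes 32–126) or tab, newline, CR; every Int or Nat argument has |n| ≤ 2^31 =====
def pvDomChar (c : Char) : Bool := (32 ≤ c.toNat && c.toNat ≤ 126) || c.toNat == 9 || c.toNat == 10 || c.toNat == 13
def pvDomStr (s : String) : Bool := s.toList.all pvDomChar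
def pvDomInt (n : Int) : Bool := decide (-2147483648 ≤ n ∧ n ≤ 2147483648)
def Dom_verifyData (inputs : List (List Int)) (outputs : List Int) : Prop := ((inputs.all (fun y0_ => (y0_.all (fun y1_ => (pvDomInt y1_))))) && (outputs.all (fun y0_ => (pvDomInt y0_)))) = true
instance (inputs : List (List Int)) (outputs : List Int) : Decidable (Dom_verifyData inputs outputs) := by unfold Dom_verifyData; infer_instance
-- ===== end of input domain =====

-- B replaces A's three-way neighbour tests and per-kept-row copy.index scans by one-pass
-- count/first-index dictionaries and a single filter over the sorted list; equivalence is about the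
-- RETURN value (both A and B sort `inputs` in place identically).

-- ===== PORT A =====
def verifyData (inputs : List (List Int)) (outputs : List Int) : List (List Int) × List Int :=
  let matrix : List (List Int) := []
  let output : List Int := []
  let copy : List (List Int) := inputs.map (fun x => x)          -- [x for x in inputs]
  let inputs := PySem.List.sorted inputs (fun row => row) false  -- inputs.sort(key=lambda row: row[0:]); row[0:] is the row itself
  let ln : Int := inputs.length
  let st :=
    if PySem.List.pyGetD inputs 0 [] ≠ PySem.List.pyGetD inputs 1 [] then
      (matrix ++ [PySem.List.pyGetD inputs 0 []],
       output ++ [PySem.List.pyGetD outputs (((PySem.List.index? copy (PySem.List.pyGetD inputs 0 [])).getD 0 : Nat) : Int) 0])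
    else (matrix, output)
  let st := (PySem.List.pyRange 1 (ln - 1) 1).foldl (fun st i =>
      if PySem.List.pyGetD inputs (i-1) [] ≠ PySem.List.pyGetD inputs i [] ∧
         PySem.List.pyGetD inputs i [] ≠ PySem.List.pyGetD inputs (i+1) [] then
        (st.1 ++ [PySem.List.pyGetD inputs i []],
         st.2 ++ [PySem.List.pyGetD outputs (((PySem.List.index? copy (PySem.List.pyGetD inputs i [])).getD 0 : Nat) : Int) 0])
      else st) st
  let st :=
    if PySem.List.pyGetD inputs (ln - 2) [] ≠ PySem.List.pyGetD inputs (ln - 1) [] then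
      (st.1 ++ [PySem.List.pyGetD inputs (ln - 1) []],
       st.2 ++ [PySem.List.pyGetD outputs (((PySem.List.index? copy (PySem.List.pyGetD inputs (ln - 1) [])).getD 0 : Nat) : Int) 0])
    else st
  st

-- ===== PORT B =====
def verifyData_alt (inputs : List (List Int)) (outputs : List Int) : List (List Int) × List Int :=
  let copy : List (List Int) := inputs.map (fun x => x)          -- copy = [x for x in inputs]
  let inputs := PySem.List.sorted inputs (fun row => row) false  -- inputs.sort(key=lambda row: row[0:])
  let counts : PySem.Dict (List Int) Int :=
    copy.foldl (fun d r => d.insert r (d.getD r 0 + 1)) PySem.Dict.empty      -- counts[t] = counts.get(t,0)+1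
  let first : PySem.Dict (List Int) Int :=
    (PySem.List.enumerate copy).foldl
      (fun d p => if d.contains p.2 then d else d.insert p.2 p.1) PySem.Dict.empty  -- if t not in first: first[t]=i
  inputs.foldl (fun st row =>
    if counts.getD row 0 == 1 then
      (st.1 ++ [row], st.2 ++ [PySem.List.pyGetD outputs (first.getD row 0) 0])
    else st) ([], [])

-- ===== PRECONDITION & SPEC =====
-- Pre_ excludes exactly the inputs where the Python A raises IndexError: fewer than two rows
-- (A reads inputs[0]/inputs[1] unconditionally), or some row occurring exactly once whose
-- first-occurrence index is not a valid index into outputs.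
def Pre_verifyData (inputs : List (List Int)) (outputs : List Int) : Prop :=
  2 ≤ inputs.length ∧ ∀ r ∈ inputs, inputs.count r = 1 → inputs.idxOf r < outputs.length
instance (inputs : List (List Int)) (outputs : List Int) : Decidable (Pre_verifyData inputs outputs) := by
  unfold Pre_verifyData; infer_instance
def pvWitness_verifyData : List (List Int) × List Int := ([[1], [2]], [10, 20])

def Spec_verifyData (inputs : List (List Int)) (outputs : List Int) (out : List (List Int) × List Int) : Prop := out = verifyData_alt inputs outputs
instance (inputs : List (List Int)) (outputs : List Int) (out : List (List Int) × List Int) : Decidable (Spec_verifyData inputs outputs out) := by unfold Spec_verifyData; infer_instance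

-- ===== CLAIM (what is proved, stated in full; the proofs are below) =====
def Claim_equal_verifyData : Prop := ∀ (inputs : List (List Int)) (outputs : List Int), Dom_verifyData inputs outputs → Pre_verifyData inputs outputs → Spec_verifyData inputs outputs (verifyData inputs outputs)

-- ===== LEMMAS AND PROOFS =====

theorem sortedMono (s : List (List Int)) (hp : s.Pairwise (fun a b : List Int => a ≤ b))
    (p q : Nat) (hpq : p ≤ q) (hq : q < s.length) :
    s.getD p [] ≤ s.getD q [] := by
  rcases eq_or_lt_of_le hpq with rfl | hlt
  · exact le_refl _
  · rw [List.getD_eq_getElem _ _ (lt_trans hlt hq), List.getD_eq_getElem _ _ hq]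
    exact (List.pairwise_iff_getElem.mp hp) p q (lt_trans hlt hq) hq hlt

theorem getD_mem_drop (s : List (List Int)) (k j : Nat) (h : j < s.length) (hk : k ≤ j) :
    s.getD j [] ∈ s.drop k := by
  have hlt : j - k < (s.drop k).length := by simp; omega
  have : (s.drop k)[j-k]'hlt = s.getD j [] := by
    rw [List.getElem_drop]
    have e : k + (j - k) = j := by omega
    simp [e, List.getElem?_eq_getElem h, List.getD]
  exact this ▸ List.getElem_mem _

theorem getD_mem_take (s : List (List Int)) (k j : Nat) (h : j < s.length) (hk : j < k) :
    s.getD j [] ∈ s.take k := by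
  have hlt : j < (s.take k).length := by simp; omega
  have : (s.take k)[j]'hlt = s.getD j [] := by
    rw [List.getElem_take, List.getD_eq_getElem _ _ h]
  exact this ▸ List.getElem_mem _

theorem sorted_count_one_iff (s : List (List Int)) (hp : s.Pairwise (fun a b : List Int => a ≤ b))
    (i : Nat) (hi : i < s.length) :
    (s.count (s.getD i []) = 1) ↔
      ((i = 0 ∨ s.getD (i-1) [] ≠ s.getD i []) ∧ (i = s.length - 1 ∨ s.getD i [] ≠ s.getD (i+1) [])) := by
  set x := s.getD i [] with hx
  constructor
  · intro hcnt
    constructor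
    · by_contra h
      push_neg at h
      obtain ⟨h0, he⟩ := h
      have h1 : x ∈ s.take i := he ▸ getD_mem_take s i (i-1) (by omega) (by omega)
      have h2 : x ∈ s.drop i := getD_mem_drop s i i hi (le_refl _)
      have := @List.count_append _ _ x (s.take i) (s.drop i)
      rw [List.take_append_drop] at this
      have c1 := List.count_pos_iff.mpr h1
      have c2 := List.count_pos_iff.mpr h2
      omega
    · by_contra h
      push_neg at h
      obtain ⟨h0, he⟩ := h
      have h1 : x ∈ s.take (i+1) := getD_mem_take s (i+1) i hi (by omega)
      have h2 : x ∈ s.drop (i+1) := he ▸ getD_mem_drop s (i+1) (i+1) (by omega) (le_refl _)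
      have := @List.count_append _ _ x (s.take (i+1)) (s.drop (i+1))
      rw [List.take_append_drop] at this
      have c1 := List.count_pos_iff.mpr h1
      have c2 := List.count_pos_iff.mpr h2
      omega
  · rintro ⟨hl, hr⟩
    have hdrop : s.drop i = x :: s.drop (i+1) := by
      rw [List.drop_eq_getElem_cons hi]
      congr 1
      rw [hx, List.getD_eq_getElem _ _ hi]
    have htake0 : (s.take i).count x = 0 := by
      rw [List.count_eq_zero]
      intro hmem
      obtain ⟨j, hj, hv⟩ := List.mem_iff_getElem.mp hmem
      have hj' : j < i := by simp at hj; omega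
      have hvj : s.getD j [] = x := by
        rw [List.getD_eq_getElem _ _ (by omega), ← hv, List.getElem_take]
      rcases hl with h0 | hne
      · omega
      · have m1 : s.getD j [] ≤ s.getD (i-1) [] := sortedMono s hp j (i-1) (by omega) (by omega)
        have m2 : s.getD (i-1) [] ≤ x := hx ▸ sortedMono s hp (i-1) i (by omega) hi
        have : s.getD (i-1) [] = x := le_antisymm m2 (hvj ▸ m1)
        exact hne (hx ▸ this)
    have hdrop0 : (s.drop (i+1)).count x = 0 := by
      rw [List.count_eq_zero]
      intro hmem
      obtain ⟨j, hj, hv⟩ := List.mem_iff_getElem.mp hmem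
      have hj' : i + 1 + j < s.length := by simp at hj; omega
      have hvj : s.getD (i+1+j) [] = x := by
        rw [List.getD_eq_getElem _ _ hj', ← hv, List.getElem_drop]
      rcases hr with h0 | hne
      · omega
      · have m1 : s.getD (i+1) [] ≤ s.getD (i+1+j) [] := sortedMono s hp (i+1) (i+1+j) (by omega) hj'
        have m2 : x ≤ s.getD (i+1) [] := hx ▸ sortedMono s hp i (i+1) (by omega) (by omega)
        have : s.getD (i+1) [] = x := le_antisymm (hvj ▸ m1) m2
        exact hne (hx ▸ this.symm)
    have := @List.count_append _ _ x (s.take i) (s.drop i)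
    rw [List.take_append_drop, hdrop] at this
    simp [List.count_cons] at this
    omega

theorem first_get?_inv {k : Type} [BEq k] [LawfulBEq k] (l : List k) (st : Int) (d : PySem.Dict k Int) (r : k) :
    (((PySem.List.enumerate l st).foldl
        (fun d p => if d.contains p.2 then d else d.insert p.2 p.1) d).get? r)
      = if d.contains r then d.get? r else (PySem.List.index? l r).map (fun k => st + (k : Int)) := by
  induction l generalizing st d with
  | nil =>
      rw [PySem.List.enumerate_nil, List.foldl_nil]
      rw [PySem.List.index?_eq_idxOf?]
      split_ifs with h
      · rfl
      · simp only [List.idxOf?_nil, Option.map_none]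
        exact (PySem.Dict.get?_eq_none_iff_contains d r).mpr (by simp [h])
  | cons x t ih =>
      rw [PySem.List.enumerate_cons, List.foldl_cons]
      by_cases hx : d.contains x
      · rw [if_pos hx, ih]
        by_cases hr : r = x
        · subst hr; simp [hx]
        · rw [PySem.List.index?_cons_of_ne t (Ne.symm hr)]
          split_ifs with h
          · rfl
          · cases hidx : PySem.List.index? t r <;> simp [hidx] <;> omega
      · rw [if_neg hx, ih]
        have hcont : ∀ r', (d.insert x st).contains r' = (r' == x || d.contains r') := by
          intro r'
          by_cases h : r' = x
          · subst h; simp [PySem.Dict.contains_eq_isSome_get?, PySem.Dict.get?_insert_self]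
          · simp [PySem.Dict.contains_eq_isSome_get?, PySem.Dict.get?_insert_of_ne _ _ h, h]
        by_cases hr : r = x
        · subst hr
          rw [hcont, if_neg hx, if_pos (by simp), PySem.Dict.get?_insert_self,
            PySem.List.index?_cons_self]
          simp
        · rw [hcont, PySem.Dict.get?_insert_of_ne _ _ hr, PySem.List.index?_cons_of_ne t (Ne.symm hr)]
          have he : (r == x || d.contains r) = d.contains r := by simp [hr]
          rw [he]
          split_ifs with h
          · rfl
          · cases hidx : PySem.List.index? t r <;> simp [hidx] <;> omega

theorem first_getD {x : Type} [BEq x] [LawfulBEq x] (copy : List x) (r : x) (k : Nat)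
    (hk : PySem.List.index? copy r = some k) :
    (((PySem.List.enumerate copy).foldl
        (fun d p => if d.contains p.2 then d else d.insert p.2 p.1) PySem.Dict.empty).getD r 0)
      = (k : Int) := by
  rw [PySem.Dict.getD_eq_get?_getD, first_get?_inv, hk]
  simp

theorem foldl_pair_append_if {α β γ : Type} (C : α → Prop) [DecidablePred C]
    (f : α → β) (g : α → γ) (l : List α) (a : List β) (b : List γ) :
    l.foldl (fun st x => if C x then (st.1 ++ [f x], st.2 ++ [g x]) else st) (a, b)
      = (a ++ (l.filter (fun x => decide (C x))).map f,
         b ++ (l.filter (fun x => decide (C x))).map g) := by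
  induction l generalizing a b with
  | nil => simp
  | cons x t ih =>
      by_cases h : C x
      · simp only [List.foldl_cons, if_pos h, ih, List.filter_cons, decide_eq_true h]
        simp
      · simp only [List.foldl_cons, if_neg h, ih, List.filter_cons, decide_eq_false h]
        simp

theorem pyGetD_toNat (s : List (List Int)) (i : Int) (h0 : 0 ≤ i) (h1 : i < (s.length : Int)) :
    PySem.List.pyGetD s i [] = s.getD i.toNat [] := by
  rw [PySem.List.pyGetD_eq_getElem s [] h0 h1, List.getD_eq_getElem _ _ (by omega)]

theorem aside {b : Type} (s : List (List Int)) (hp : s.Pairwise (fun a b : List Int => a ≤ b))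
    (h2 : 2 ≤ s.length) (F : List Int → b) :
    (if PySem.List.pyGetD s 0 [] ≠ PySem.List.pyGetD s 1 [] then [F (PySem.List.pyGetD s 0 [])] else [])
      ++ ((PySem.List.pyRange 1 ((s.length : Int) - 1) 1).filter
            (fun i => decide (PySem.List.pyGetD s (i-1) [] ≠ PySem.List.pyGetD s i [] ∧
               PySem.List.pyGetD s i [] ≠ PySem.List.pyGetD s (i+1) []))).map
          (fun i => F (PySem.List.pyGetD s i []))
      ++ (if PySem.List.pyGetD s ((s.length : Int) - 2) [] ≠ PySem.List.pyGetD s ((s.length : Int) - 1) []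
          then [F (PySem.List.pyGetD s ((s.length : Int) - 1) [])] else [])
    = (s.filter (fun r => s.count r == 1)).map F := by
  have hlen2 : (2:Int) ≤ (s.length : Int) := by push_cast; omega
  -- the three case conditions, via sortedness
  have hcnt0 : ((s.count (PySem.List.pyGetD s 0 []) == 1) = true) ↔
      (PySem.List.pyGetD s 0 [] ≠ PySem.List.pyGetD s 1 []) := by
    rw [pyGetD_toNat s 0 (by omega) (by omega), pyGetD_toNat s 1 (by omega) (by omega)]
    simp only [beq_iff_eq, Int.toNat_zero, Int.toNat_one]
    rw [sorted_count_one_iff s hp 0 (by omega)]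
    simp [show ¬ (0 = s.length - 1) from by omega]
  have hcntL : ((s.count (PySem.List.pyGetD s ((s.length : Int) - 1) []) == 1) = true) ↔
      (PySem.List.pyGetD s ((s.length : Int) - 2) [] ≠ PySem.List.pyGetD s ((s.length : Int) - 1) []) := by
    rw [pyGetD_toNat s ((s.length : Int) - 2) (by omega) (by omega),
        pyGetD_toNat s ((s.length : Int) - 1) (by omega) (by omega)]
    simp only [beq_iff_eq]
    have e1 : ((s.length : Int) - 1).toNat = s.length - 1 := by omega
    have e2 : ((s.length : Int) - 2).toNat = s.length - 1 - 1 := by omega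
    rw [e1, e2, sorted_count_one_iff s hp (s.length - 1) (by omega)]
    simp [show ¬ (s.length - 1 = 0) from by omega]
  have hcntM : ∀ i : Int, 1 ≤ i → i < (s.length : Int) - 1 →
      (((s.count (PySem.List.pyGetD s i []) == 1) = true) ↔
        (PySem.List.pyGetD s (i-1) [] ≠ PySem.List.pyGetD s i [] ∧
         PySem.List.pyGetD s i [] ≠ PySem.List.pyGetD s (i+1) [])) := by
    intro i hi1 hi2
    rw [pyGetD_toNat s (i-1) (by omega) (by omega), pyGetD_toNat s i (by omega) (by omega),
        pyGetD_toNat s (i+1) (by omega) (by omega)]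
    simp only [beq_iff_eq]
    rw [sorted_count_one_iff s hp i.toNat (by omega)]
    have e1 : (i - 1).toNat = i.toNat - 1 := by omega
    have e2 : (i + 1).toNat = i.toNat + 1 := by omega
    rw [e1, e2]
    simp [show ¬ (i.toNat = 0) from by omega, show ¬ (i.toNat = s.length - 1) from by omega]
  set Q : List Int → Bool := fun r => s.count r == 1 with hQ
  conv_rhs => rw [← PySem.List.map_pyGetD_pyRange_zero' s []]
  rw [List.filter_map, List.map_map]
  rw [PySem.List.pyRange_one_append 0 1 (s.length : Int) (by omega) (by omega),
      PySem.List.pyRange_one_append 1 ((s.length : Int) - 1) (s.length : Int) (by omega) (by omega)]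
  rw [PySem.List.pyRange_one_cons (a := (s.length : Int) - 1) (by omega),
      PySem.List.pyRange_one_eq_nil (a := (s.length : Int) - 1 + 1) (by omega),
      PySem.List.pyRange_one_cons (a := (0:Int)) (by omega),
      PySem.List.pyRange_one_eq_nil (a := (0:Int) + 1) (b := 1) (by omega)]
  simp only [List.filter_append, List.map_append, List.filter_cons, List.filter_nil,
    Function.comp_apply, List.map_nil, List.map_cons, ← List.append_assoc]
  congr 1
  congr 1
  · -- first chunk
    by_cases h01 : PySem.List.pyGetD s 0 [] ≠ PySem.List.pyGetD s 1 []
    · rw [if_pos h01, if_pos (hcnt0.mpr h01)]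
      simp
    · rw [if_neg h01, if_neg (fun hc => h01 (hcnt0.mp hc))]
      simp
  · -- middle chunk
    rw [List.filter_congr (l := PySem.List.pyRange 1 ((s.length : Int) - 1))
      (q := fun i => Q (PySem.List.pyGetD s i []))
      (by
        intro i hi
        obtain ⟨hi1, hi2⟩ := PySem.List.mem_pyRange_one.mp hi
        have := hcntM i hi1 hi2
        by_cases hc : PySem.List.pyGetD s (i-1) [] ≠ PySem.List.pyGetD s i [] ∧
            PySem.List.pyGetD s i [] ≠ PySem.List.pyGetD s (i+1) []
        · simp [hc, hQ, this.mpr hc]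
        · simp only [decide_eq_false hc]
          exact (Bool.eq_false_iff.mpr (fun hc2 => hc (this.mp hc2))).symm)]
    rfl
  · -- last chunk
    by_cases hL : PySem.List.pyGetD s ((s.length : Int) - 2) [] ≠ PySem.List.pyGetD s ((s.length : Int) - 1) []
    · rw [if_pos hL, if_pos (hcntL.mpr hL)]
      simp
    · rw [if_neg hL, if_neg (fun hc => hL (hcntL.mp hc))]
      rfl

theorem prodIte {α β : Type} (C : Prop) [Decidable C] (a : α) (b : β) (c : α) (d : β) :
    (if C then (a, b) else (c, d)) = (if C then a else c, if C then b else d) := by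
  split_ifs <;> rfl

theorem appendIte {α : Type} (C : Prop) [Decidable C] (l : List α) (x : α) :
    (if C then l ++ [x] else l) = l ++ (if C then [x] else []) := by
  split_ifs <;> simp

theorem sorted_inst_eq (inputs : List (List Int)) :
    PySem.List.sorted inputs (fun row => row) false
      = @PySem.List.sorted (List Int) (List Int) List.instLinearOrder.toLT
          LinearOrder.toDecidableLT inputs (fun row => row) false := by
  congr 1

theorem portA_norm (inputs : List (List Int)) (outputs : List Int) (h2 : 2 ≤ inputs.length) :
    verifyData inputs outputs =
      ((PySem.List.sorted inputs (fun row => row) false).filter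
          (fun r => (PySem.List.sorted inputs (fun row => row) false).count r == 1),
       ((PySem.List.sorted inputs (fun row => row) false).filter
          (fun r => (PySem.List.sorted inputs (fun row => row) false).count r == 1)).map
         (fun r => PySem.List.pyGetD outputs (((PySem.List.index? inputs r).getD 0 : Nat) : Int) 0)) := by
  have hperm : (@PySem.List.sorted (List Int) (List Int) List.instLinearOrder.toLT
      LinearOrder.toDecidableLT inputs (fun row => row) false).Perm inputs :=
    @PySem.List.sorted_perm (List Int) (List Int) List.instLinearOrder.toLT
      LinearOrder.toDecidableLT inputs (fun row => row) false
  have hp := PySem.List.sorted_pairwise (κ := List Int) inputs (fun row => row)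
  have h2s : 2 ≤ (@PySem.List.sorted (List Int) (List Int) List.instLinearOrder.toLT
      LinearOrder.toDecidableLT inputs (fun row => row) false).length := by
    rw [hperm.length_eq]; exact h2
  have hA := aside _ hp h2s (fun r : List Int => r)
  have hB := aside _ hp h2s
    (fun r : List Int => PySem.List.pyGetD outputs (((PySem.List.index? inputs r).getD 0 : Nat) : Int) 0)
  simp only [verifyData, List.map_id', List.nil_append]
  rw [sorted_inst_eq inputs]
  rw [prodIte]
  rw [foldl_pair_append_if]
  dsimp only
  rw [prodIte, appendIte, appendIte]
  exact Prod.ext (by exact hA.trans (List.map_id' _)) (by exact hB)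

theorem portB_norm (inputs : List (List Int)) (outputs : List Int) :
    verifyData_alt inputs outputs =
      ((PySem.List.sorted inputs (fun row => row) false).filter
          (fun r => (PySem.List.sorted inputs (fun row => row) false).count r == 1),
       ((PySem.List.sorted inputs (fun row => row) false).filter
          (fun r => (PySem.List.sorted inputs (fun row => row) false).count r == 1)).map
         (fun r => PySem.List.pyGetD outputs (((PySem.List.index? inputs r).getD 0 : Nat) : Int) 0)) := by
  have hperm : (PySem.List.sorted inputs (fun row => row) false).Perm inputs :=
    PySem.List.sorted_perm inputs (fun row => row) false
  simp only [verifyData_alt, List.map_id']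
  rw [foldl_pair_append_if]
  simp only [List.nil_append, Bool.decide_eq_true]
  have hpred : ∀ r : List Int,
      ((inputs.foldl (fun d r => d.insert r (d.getD r 0 + 1))
          (PySem.Dict.empty : PySem.Dict (List Int) Int)).getD r 0 == 1)
        = ((PySem.List.sorted inputs (fun row => row) false).count r == 1) := by
    intro r
    rw [PySem.Dict.getD_foldl_insert_add_one, hperm.count_eq r]
    simp only [PySem.Dict.getD_empty, zero_add]
    exact decide_eq_decide.mpr Nat.cast_eq_one
  simp only [hpred]
  refine Prod.ext (List.map_id' _) ?_
  apply List.map_congr_left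
  intro r hr
  have hrs : r ∈ inputs := hperm.mem_iff.mp (List.mem_of_mem_filter hr)
  obtain ⟨k, hk⟩ := Option.isSome_iff_exists.mp (((PySem.List.index?_isSome_iff _ _).mpr hrs))
  rw [first_getD inputs r k hk, hk]
  simp


-- ===== VERDICT (by name: the statement is the Claim_ definition above) =====
theorem verifyData_spec : Claim_equal_verifyData := by
  intro inputs outputs _ hpre
  exact (portA_norm inputs outputs hpre.1).trans (portB_norm inputs outputs).symm
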